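-- pv_equiv track=rewrite | github.com/9776mk/algorithm_problems | 프로그래머스/lv1/82612. 부족한 금액 계산하기/부족한 금액 계산하기.py | solution
-- ===== SOURCE A (Python) =====
-- def solution(price, money, count):
--     sum = 0
--
--     for i in range(1, count + 1):
--         sum += i * price
--
--     if sum > money:
--         answer = sum - money
--
--     else:
--         answer = 0
--
--     return answer
-- ===== SOURCE B (Python) =====
-- def solution(price, money, count):
--     total = price * count * (count + 1) // 2 if count >= 0 else 0
--     shortfall = total - money
--     return shortfall if shortfall > 0 else 0
-- ===== Notes on version B (the rewrite author's own statement) =====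
-- stated objective: faster
-- what changed: replaces the O(count) accumulation loop by the closed-form arithmetic-series formula price*count*(count+1)//2
import Mathlib
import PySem

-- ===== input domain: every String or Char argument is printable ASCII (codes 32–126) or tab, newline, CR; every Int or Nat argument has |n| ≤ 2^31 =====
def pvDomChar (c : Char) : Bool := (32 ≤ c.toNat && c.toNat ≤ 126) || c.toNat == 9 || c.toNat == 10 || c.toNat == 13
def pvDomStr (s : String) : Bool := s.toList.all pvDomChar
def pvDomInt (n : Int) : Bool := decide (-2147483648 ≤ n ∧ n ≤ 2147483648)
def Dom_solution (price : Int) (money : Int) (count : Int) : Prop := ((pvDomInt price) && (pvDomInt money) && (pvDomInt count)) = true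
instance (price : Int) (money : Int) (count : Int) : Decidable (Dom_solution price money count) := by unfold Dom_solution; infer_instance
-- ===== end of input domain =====

-- B replaces A's O(count) accumulation loop by the closed-form series formula (objective: faster).

-- ===== PORT A =====
def solution (price : Int) (money : Int) (count : Int) : Int :=
  let sum := (PySem.List.pyRange 1 (count + 1) 1).foldl (fun s i => s + i * price) 0
  if sum > money then sum - money else 0

-- ===== PORT B =====
def solution_alt (price : Int) (money : Int) (count : Int) : Int :=
  let total := if count ≥ 0 then PySem.Int.floordiv (price * count * (count + 1)) 2 else 0
  let shortfall := total - money
  if shortfall > 0 then shortfall else 0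

-- ===== PRECONDITION & SPEC =====
def Spec_solution (price : Int) (money : Int) (count : Int) (out : Int) : Prop := out = solution_alt price money count
instance (price : Int) (money : Int) (count : Int) (out : Int) : Decidable (Spec_solution price money count out) := by unfold Spec_solution; infer_instance

-- ===== CLAIM (what is proved, stated in full; the proofs are below) =====
def Claim_equal_solution : Prop := ∀ (price : Int) (money : Int) (count : Int), Dom_solution price money count → Spec_solution price money count (solution price money count)

-- ===== LEMMAS AND PROOFS =====

-- the loop's sum, doubled, is price * n * (n+1)
theorem pv_loop_sum (price : Int) : ∀ (n : Nat) (s : Int),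
    (PySem.List.pyRange 1 ((n : Int) + 1) 1).foldl (fun s i => s + i * price) s * 2
      = s * 2 + price * (n : Int) * ((n : Int) + 1) := by
  intro n
  induction n with
  | zero => intro s; simp [PySem.List.pyRange_one_eq_nil]
  | succ k ih =>
      intro s
      have h : (((k : Nat) + 1 : Nat) : Int) + 1 = ((k : Int) + 1) + 1 := by push_cast; ring
      rw [h, PySem.List.pyRange_one_succ_right (by omega : (1 : Int) ≤ (k : Int) + 1)]
      rw [List.foldl_append]
      simp only [List.foldl_cons, List.foldl_nil]
      push_cast
      linear_combination ih s

theorem solution_eq_alt (price money count : Int) :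
    solution price money count = solution_alt price money count := by
  unfold solution solution_alt
  by_cases hc : 0 ≤ count
  · obtain ⟨n, hn⟩ := Int.eq_ofNat_of_zero_le hc
    subst hn
    have hsum := pv_loop_sum price n 0
    simp only [zero_mul, zero_add] at hsum
    have hfd : PySem.Int.floordiv (price * (n : Int) * ((n : Int) + 1)) 2
        = (PySem.List.pyRange 1 ((n : Int) + 1) 1).foldl (fun s i => s + i * price) 0 := by
      rw [← hsum]
      simp [PySem.Int.floordiv]
    simp only [ge_iff_le, if_pos (Int.natCast_nonneg n), hfd]
    split_ifs <;> omega
  · have hnil : PySem.List.pyRange 1 (count + 1) 1 = [] :=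
      PySem.List.pyRange_one_eq_nil (by omega)
    rw [hnil]
    simp only [List.foldl_nil, ge_iff_le, if_neg (by omega : ¬ (0 : Int) ≤ count)]
    split_ifs <;> omega

-- ===== VERDICT (by name: the statement is the Claim_ definition above) =====
theorem solution_spec : Claim_equal_solution := by
  intro price money count _
  exact solution_eq_alt price money count
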